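-- pv_equiv track=rewrite | github.com/Drakkens/EVReader | TooltipGathering/Software/MainStatTooltip.py | find_stat_name
-- ===== SOURCE A (Python) =====
-- def find_stat_name(text):
--     first_number_index = len(text[0])
--     for index in range(0, len(text[0])):
--         if text[0][index].isdigit():
--             first_number_index = index
--             break
--
--     if text[0].find(' ') == -1:
--         stat_name_separator = first_number_index
--     else:
--         stat_name_separator = min(text[0].find(' '), first_number_index)
--
--     stat_name = text[0][:stat_name_separator].capitalize().strip()
--
--     return stat_name, stat_name_separator
-- ===== SOURCE B (Python) =====
-- def find_stat_name(text):
--     s = text[0]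
--     prefix = []
--     separator = len(s)
--     for i, ch in enumerate(s):
--         if ch.isdigit() or ch == ' ':
--             separator = i
--             break
--         prefix.append(ch)
--     return ''.join(prefix).capitalize().strip(), separator
-- ===== Notes on version B (the rewrite author's own statement) =====
-- stated objective: simpler
-- what changed: Replaces the digit-scan loop plus a separate .find(' ') and min() with one pass that stops at the first digit-or-space index while collecting the name prefix, so no slicing pass is needed.
import Mathlib
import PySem

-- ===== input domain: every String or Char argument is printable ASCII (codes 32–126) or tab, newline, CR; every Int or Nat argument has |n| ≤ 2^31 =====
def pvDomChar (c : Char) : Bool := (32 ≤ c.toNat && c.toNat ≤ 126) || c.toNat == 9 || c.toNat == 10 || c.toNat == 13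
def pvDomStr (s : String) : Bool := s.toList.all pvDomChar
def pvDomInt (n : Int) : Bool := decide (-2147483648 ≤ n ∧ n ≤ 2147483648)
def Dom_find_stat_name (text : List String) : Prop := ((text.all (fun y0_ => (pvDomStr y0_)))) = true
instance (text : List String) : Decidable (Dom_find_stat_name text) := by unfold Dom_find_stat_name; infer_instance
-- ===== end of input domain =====

-- B merges A's digit loop, .find(' ') and min() into one scan that stops at the
-- first digit-or-space index while collecting the name prefix (objective: simpler).

-- ===== PORT A =====
-- str.capitalize(): first char upper-cased, the rest lower-cased (exact on ASCII; used by both Pythons)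
def pyCapitalize (cs : List Char) : List Char :=
  match cs with
  | [] => []
  | c :: rest => PySem.Chars.upperChar c :: rest.map PySem.Chars.lowerChar

-- A's 'for index in range(0, len(s)): if s[index].isdigit(): …; break', started with fni = dflt
def fsnDigitLoop (cs : List Char) (i : Nat) (dflt : Nat) : Nat :=
  match cs with
  | [] => dflt
  | c :: rest => if PySem.Chars.isdigit c then i else fsnDigitLoop rest (i + 1) dflt

def find_stat_name (text : List String) : String × Int :=
  let s := (PySem.List.pyGetD text 0 "").toList
  let first_number_index : Int := (fsnDigitLoop s 0 s.length : Nat)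
  let f := PySem.Chars.find s [' ']
  let stat_name_separator : Int := if f = -1 then first_number_index else min f first_number_index
  let stat_name := PySem.Chars.strip (pyCapitalize (PySem.Chars.slice s none (some stat_name_separator)))
  (String.ofList stat_name, stat_name_separator)

-- ===== PORT B =====
-- B's single loop: collect the prefix until the first digit-or-space char, returning (prefix, its index)
def fsnScan (cs : List Char) (i : Nat) : List Char × Nat :=
  match cs with
  | [] => ([], i)
  | c :: rest =>
      if PySem.Chars.isdigit c || c == ' ' then ([], i)
      else
        let r := fsnScan rest (i + 1)
        (c :: r.1, r.2)

def find_stat_name_alt (text : List String) : String × Int :=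
  let s := (PySem.List.pyGetD text 0 "").toList
  let r := fsnScan s 0
  (String.ofList (PySem.Chars.strip (pyCapitalize r.1)), (r.2 : Nat))

-- ===== PRECONDITION & SPEC =====
-- Pre_ excludes only the empty list, on which A's text[0] raises IndexError.
def Pre_find_stat_name (text : List String) : Prop := text ≠ []
instance (text : List String) : Decidable (Pre_find_stat_name text) := by unfold Pre_find_stat_name; infer_instance
def pvWitness_find_stat_name : List String := ["strength 10"]

def Spec_find_stat_name (text : List String) (out : String × Int) : Prop := out = find_stat_name_alt text
instance (text : List String) (out : String × Int) : Decidable (Spec_find_stat_name text out) := by unfold Spec_find_stat_name; infer_instance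

-- ===== CLAIM (what is proved, stated in full; the proofs are below) =====
def Claim_equal_find_stat_name : Prop := ∀ (text : List String), Dom_find_stat_name text → Pre_find_stat_name text → Spec_find_stat_name text (find_stat_name text)

-- ===== LEMMAS AND PROOFS =====
theorem fsnScan_eq (cs : List Char) (i : Nat) :
    fsnScan cs i =
      (cs.take (cs.findIdx (fun c => PySem.Chars.isdigit c || c == ' ')),
       i + cs.findIdx (fun c => PySem.Chars.isdigit c || c == ' ')) := by
  induction cs generalizing i with
  | nil => simp [fsnScan]
  | cons c rest ih =>
      by_cases h : (PySem.Chars.isdigit c || c == ' ') = true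
      · simp [fsnScan, h, List.findIdx_cons]
      · simp only [fsnScan, h, List.findIdx_cons, Bool.false_eq_true, if_false, cond_false,
          ih (i + 1), List.take_succ_cons]
        rw [Prod.mk.injEq]
        exact ⟨rfl, by omega⟩

theorem fsnDigitLoop_eq (cs : List Char) (i dflt : Nat) :
    fsnDigitLoop cs i dflt =
      if cs.findIdx PySem.Chars.isdigit < cs.length then i + cs.findIdx PySem.Chars.isdigit
      else dflt := by
  induction cs generalizing i with
  | nil => simp [fsnDigitLoop]
  | cons c rest ih =>
      by_cases h : PySem.Chars.isdigit c = true
      · simp [fsnDigitLoop, h, List.findIdx_cons]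
      · simp only [fsnDigitLoop, h, Bool.false_eq_true, if_false, List.findIdx_cons, cond_false,
          ih (i + 1), List.length_cons]
        by_cases h2 : rest.findIdx PySem.Chars.isdigit < rest.length
        · rw [if_pos h2, if_pos (by omega)]; omega
        · rw [if_neg h2, if_neg (by omega)]

theorem findIdx_or_eq_min (cs : List Char) (p q : Char → Bool) :
    cs.findIdx (fun c => p c || q c) = min (cs.findIdx p) (cs.findIdx q) := by
  induction cs with
  | nil => simp
  | cons c rest ih =>
      simp only [List.findIdx_cons]
      by_cases hp : p c = true
      · simp [hp]
      · by_cases hq : q c = true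
        · simp [hp, hq]
        · simp only [hp, hq, Bool.or_false, cond_false]
          rw [ih]; omega

-- [' '] is a prefix of cs.drop j iff cs[j]? = some ' '
theorem singleton_prefix_drop_iff (cs : List Char) (j : Nat) (a : Char) :
    [a] <+: cs.drop j ↔ cs[j]? = some a := by
  rw [← List.head?_drop]
  cases h : cs.drop j with
  | nil => simp
  | cons b t =>
      simp only [List.head?_cons]
      constructor
      · rintro ⟨u, hu⟩
        simp only [List.singleton_append] at hu
        cases hu; rfl
      · intro hba; injection hba with hba; subst hba; exact ⟨t, rfl⟩

-- characterisation of A's s.find(' ') via findIdx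
theorem find_space_eq (cs : List Char) :
    PySem.Chars.find cs [' '] =
      if cs.findIdx (· == ' ') < cs.length then ((cs.findIdx (· == ' ') : Nat) : Int) else -1 := by
  by_cases h : cs.findIdx (· == ' ') < cs.length
  · rw [if_pos h]
    have hmem : cs[cs.findIdx (· == ' ')] = ' ' := by
      have := List.findIdx_getElem (w := h) (xs := cs) (p := (· == ' '))
      simpa using this
    have hinf : [' '] <:+: cs := by
      rw [← PySem.Chars.isIn_iff_infix, ← PySem.Chars.exists_prefix_drop_iff_isIn]
      exact ⟨_, (singleton_prefix_drop_iff cs _ ' ').2 (by rw [List.getElem?_eq_getElem h, hmem])⟩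
    have hpos : 0 ≤ PySem.Chars.find cs [' '] := (PySem.Chars.find_nonneg_iff _ _).2 hinf
    obtain ⟨hpre, hmin⟩ := PySem.Chars.find_spec (s := cs) (sub := [' ']) hpos
    have hj : cs[(PySem.Chars.find cs [' ']).toNat]? = some ' ' :=
      (singleton_prefix_drop_iff cs _ ' ').1 hpre
    -- the found index equals findIdx, by double minimality
    have hlt : (PySem.Chars.find cs [' ']).toNat < cs.length := by
      by_contra hge
      have hnone : cs[(PySem.Chars.find cs [' ']).toNat]? = none :=
        List.getElem?_eq_none (by omega)
      rw [hnone] at hj; cases hj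
    have h1 : ¬ (PySem.Chars.find cs [' ']).toNat < cs.findIdx (· == ' ') := fun hc => by
      have hnp := List.not_of_lt_findIdx hc
      simp only [List.getElem?_eq_getElem hlt, Option.some.injEq] at hj
      simp only [beq_eq_false_iff_ne, ne_eq] at hnp
      exact hnp hj
    have h2 : ¬ cs.findIdx (· == ' ') < (PySem.Chars.find cs [' ']).toNat := fun hc => by
      exact hmin _ hc ((singleton_prefix_drop_iff cs _ ' ').2 (by
        simp [List.getElem?_eq_getElem h, hmem]))
    omega
  · rw [if_neg h]
    rw [PySem.Chars.find_eq_neg_one_iff]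
    intro hinf
    have : ∃ j, [' '] <+: cs.drop j :=
      (PySem.Chars.exists_prefix_drop_iff_isIn _ _).2 ((PySem.Chars.isIn_iff_infix _ _).2 hinf)
    obtain ⟨j, hj⟩ := this
    have hj' := (singleton_prefix_drop_iff cs j ' ').1 hj
    have hjlt : j < cs.length := by
      by_contra hge
      have hnone : cs[j]? = none := List.getElem?_eq_none (by omega)
      rw [hnone] at hj'; cases hj'
    have : cs.findIdx (· == ' ') ≤ j := by
      by_contra hgt
      have hnp := List.not_of_lt_findIdx (xs := cs) (p := (· == ' ')) (i := j) (by omega)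
      simp only [List.getElem?_eq_getElem hjlt, Option.some.injEq] at hj'
      simp only [beq_eq_false_iff_ne, ne_eq] at hnp
      exact hnp hj'
    omega

-- the merged predicate index equals A's separator
theorem separator_eq (cs : List Char) :
    (if PySem.Chars.find cs [' '] = -1 then ((fsnDigitLoop cs 0 cs.length : Nat) : Int)
     else min (PySem.Chars.find cs [' ']) ((fsnDigitLoop cs 0 cs.length : Nat) : Int)) =
    ((cs.findIdx (fun c => PySem.Chars.isdigit c || c == ' ') : Nat) : Int) := by
  simp only [fsnDigitLoop_eq, find_space_eq, findIdx_or_eq_min]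
  have hd : cs.findIdx PySem.Chars.isdigit ≤ cs.length := List.findIdx_le_length
  have hs : cs.findIdx (· == ' ') ≤ cs.length := List.findIdx_le_length
  by_cases h : cs.findIdx (· == ' ') < cs.length
  · rw [if_pos h]
    have : ¬ (((cs.findIdx (· == ' ') : Nat) : Int) = -1) := by omega
    rw [if_neg this]
    by_cases hd' : cs.findIdx PySem.Chars.isdigit < cs.length
    · rw [if_pos hd']
      simp only [Nat.zero_add]
      omega
    · rw [if_neg hd']
      have : cs.findIdx PySem.Chars.isdigit = cs.length := by omega
      omega
  · rw [if_neg h, if_pos rfl]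
    have hse : cs.findIdx (· == ' ') = cs.length := by omega
    by_cases hd' : cs.findIdx PySem.Chars.isdigit < cs.length
    · rw [if_pos hd']; omega
    · rw [if_neg hd']; omega

-- ===== VERDICT (by name: the statement is the Claim_ definition above) =====
theorem find_stat_name_spec : Claim_equal_find_stat_name := by
  intro text _ _
  unfold Spec_find_stat_name find_stat_name find_stat_name_alt
  simp only [fsnScan_eq, separator_eq, PySem.Chars.slice_eq_listSlice,
    PySem.List.slice_to_natCast, Nat.zero_add]
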